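-- pv_equiv track=rewrite | github.com/rytilahti-juuso/plaseeraus | participant_organizer.py | create_two_dimensional_list_from_genders
-- ===== SOURCE A (Python) =====
-- def create_two_dimensional_list_from_genders(table):
--     genders_order_in_table = []
--     for i in range(0, len(table)):
--         if(i%2 == 0):
--             groups_of_two = []
--         groups_of_two.append(table[i][2])
--         if(len(groups_of_two) == 2):
--             genders_order_in_table.append(groups_of_two)
--     return genders_order_in_table
-- ===== SOURCE B (Python) =====
-- def create_two_dimensional_list_from_genders(table):
--     genders = [row[2] for row in table]
--     return [list(pair) for pair in zip(*[iter(genders)] * 2)]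
-- ===== Notes on version B (the rewrite author's own statement) =====
-- stated objective: idiomatic
-- what changed: Replaces the single interleaved index loop with a parity flag and a carried accumulator by a two-phase decomposition: first extract the flat gender column with a comprehension, then chunk it into consecutive pairs with the zip-of-one-iterator idiom (which discards a trailing unpaired element exactly as A does).
import Mathlib
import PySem

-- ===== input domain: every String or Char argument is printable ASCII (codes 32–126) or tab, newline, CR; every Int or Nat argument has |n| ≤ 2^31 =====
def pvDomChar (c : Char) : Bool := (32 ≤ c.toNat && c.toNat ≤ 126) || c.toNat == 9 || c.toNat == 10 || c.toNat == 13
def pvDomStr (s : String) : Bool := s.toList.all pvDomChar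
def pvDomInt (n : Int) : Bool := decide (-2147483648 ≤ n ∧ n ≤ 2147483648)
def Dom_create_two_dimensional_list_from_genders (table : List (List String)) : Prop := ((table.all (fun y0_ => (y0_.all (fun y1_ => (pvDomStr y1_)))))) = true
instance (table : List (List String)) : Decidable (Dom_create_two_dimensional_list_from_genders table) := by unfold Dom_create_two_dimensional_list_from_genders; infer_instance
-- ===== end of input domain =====

-- B extracts the gender column first, then chunks it into consecutive pairs (two-phase
-- decomposition) instead of A's single index loop with a parity flag; same return value.


-- ===== PORT A =====
-- 'for i in range(0, len(table))' with 'table[i]' is ported as a fold over the enumerated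
-- list (index, row); row[2] is PySem.List.pyGetD row 2 "" — exact under Pre_ (every row
-- has length ≥ 3, exactly where Python does not raise IndexError).
def pvStepA (st : List (List String) × List String) (p : Int × List String) :
    List (List String) × List String :=
  let groups := if PySem.Int.mod p.1 2 = 0 then ([] : List String) else st.2
  let groups := groups ++ [PySem.List.pyGetD p.2 2 ""]
  if groups.length = 2 then (st.1 ++ [groups], groups) else (st.1, groups)

def create_two_dimensional_list_from_genders (table : List (List String)) : List (List String) :=
  ((PySem.List.enumerate table 0).foldl pvStepA ([], [])).1

-- ===== PORT B =====
-- phase 2 of Source B: zip(*[iter(genders)]*2) — consecutive pairs, trailing element dropped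
def pvPairUp : List String → List (List String)
  | a :: b :: rest => [a, b] :: pvPairUp rest
  | _ => []

def create_two_dimensional_list_from_genders_alt (table : List (List String)) : List (List String) :=
  let genders := table.map (fun row => PySem.List.pyGetD row 2 "")
  pvPairUp genders

-- ===== PRECONDITION & SPEC =====
-- Pre_: every row has at least 3 entries — exactly where Python A's row[2] does not raise IndexError.
def Pre_create_two_dimensional_list_from_genders (table : List (List String)) : Prop :=
  ∀ row ∈ table, 3 ≤ row.length
instance (table : List (List String)) : Decidable (Pre_create_two_dimensional_list_from_genders table) := by unfold Pre_create_two_dimensional_list_from_genders; infer_instance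

def pvWitness_create_two_dimensional_list_from_genders : List (List String) :=
  [["a", "b", "M"], ["c", "d", "F"], ["e", "f", "M"]]

def Spec_create_two_dimensional_list_from_genders (table : List (List String)) (out : List (List String)) : Prop := out = create_two_dimensional_list_from_genders_alt table
instance (table : List (List String)) (out : List (List String)) : Decidable (Spec_create_two_dimensional_list_from_genders table out) := by unfold Spec_create_two_dimensional_list_from_genders; infer_instance

-- ===== CLAIM (what is proved, stated in full; the proofs are below) =====
def Claim_equal_create_two_dimensional_list_from_genders : Prop := ∀ (table : List (List String)), Dom_create_two_dimensional_list_from_genders table → Pre_create_two_dimensional_list_from_genders table → Spec_create_two_dimensional_list_from_genders table (create_two_dimensional_list_from_genders table)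

-- ===== LEMMAS AND PROOFS =====
-- Loop invariant: folding A's step over the rows enumerated from an even index a, with any
-- carried pair-buffer, appends exactly the consecutive pairs of the extracted genders.
lemma pvA_loop (n : Nat) :
    ∀ (table : List (List String)), table.length ≤ n →
    ∀ (a : Int), PySem.Int.mod a 2 = 0 →
    ∀ (acc : List (List String)) (g : List String),
      ((PySem.List.enumerate table a).foldl pvStepA (acc, g)).1 =
        acc ++ pvPairUp (table.map (fun row => PySem.List.pyGetD row 2 "")) := by
  induction n with
  | zero =>
    intro table hlen a _ acc g
    have : table = [] := List.eq_nil_of_length_eq_zero (Nat.le_zero.mp hlen)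
    subst this
    simp [PySem.List.enumerate_nil, pvPairUp]
  | succ n ih =>
    intro table hlen a ha acc g
    match table with
    | [] => simp [PySem.List.enumerate_nil, pvPairUp]
    | [x] =>
      simp only [PySem.List.enumerate_cons, PySem.List.enumerate_nil, List.foldl_cons,
        List.foldl_nil, List.map, pvPairUp, pvStepA, ha, if_true]
      simp
    | x :: y :: rest =>
      have hd : 2 ∣ a := (PySem.Int.mod_eq_zero_iff_dvd a 2).mp ha
      have hd1 : ¬ 2 ∣ (a + 1) := by omega
      have ha2 : PySem.Int.mod (a + 1 + 1) 2 = 0 := by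
        rw [PySem.Int.mod_eq_zero_iff_dvd]; omega
      have hrest : rest.length ≤ n := by
        simp at hlen; omega
      simp only [PySem.List.enumerate_cons, List.foldl_cons]
      rw [show pvStepA (pvStepA (acc, g) (a, x)) (a + 1, y)
            = (acc ++ [[PySem.List.pyGetD x 2 "", PySem.List.pyGetD y 2 ""]],
               [PySem.List.pyGetD x 2 "", PySem.List.pyGetD y 2 ""]) by
        simp [pvStepA, hd, hd1]]
      rw [ih rest hrest (a + 1 + 1) ha2]
      simp [pvPairUp]

-- ===== VERDICT (by name: the statement is the Claim_ definition above) =====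
theorem create_two_dimensional_list_from_genders_spec : Claim_equal_create_two_dimensional_list_from_genders := by
  intro table _ _
  show _ = _
  unfold create_two_dimensional_list_from_genders create_two_dimensional_list_from_genders_alt
  exact pvA_loop table.length table (le_refl _) 0 (by decide) [] []
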